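-- pv_equiv track=rewrite | github.com/vitalvightz/unlxck-gpt-webhook | mental/main.py | bucket_drills_by_phase
-- ===== SOURCE A (Python) =====
-- def bucket_drills_by_phase(drills):
--     """Return drills grouped by phase with UNIVERSAL kept separate."""
--     buckets = {"GPP": [], "SPP": [], "TAPER": [], "UNIVERSAL": []}
--     for d in drills:
--         phase = d.get("phase", "GPP").upper()
--         if phase not in buckets:
--             phase = "GPP"
--         buckets[phase].append(d)
--     return buckets
-- ===== SOURCE B (Python) =====
-- PHASES = ["GPP", "SPP", "TAPER", "UNIVERSAL"]
--
--
-- def _norm_phase(d):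
--     p = d.get("phase", "GPP").upper()
--     return p if p in PHASES else "GPP"
--
--
-- def bucket_drills_by_phase(drills):
--     """Return drills grouped by phase with UNIVERSAL kept separate."""
--     return {k: [d for d in drills if _norm_phase(d) == k] for k in PHASES}
-- ===== Notes on version B (the rewrite author's own statement) =====
-- stated objective: idiomatic
-- what changed: Replaces the single distributing append-loop over a mutable bucket dict by a phase-normalizing helper plus a dict comprehension that builds each bucket with one filter pass per fixed key.
import Mathlib
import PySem

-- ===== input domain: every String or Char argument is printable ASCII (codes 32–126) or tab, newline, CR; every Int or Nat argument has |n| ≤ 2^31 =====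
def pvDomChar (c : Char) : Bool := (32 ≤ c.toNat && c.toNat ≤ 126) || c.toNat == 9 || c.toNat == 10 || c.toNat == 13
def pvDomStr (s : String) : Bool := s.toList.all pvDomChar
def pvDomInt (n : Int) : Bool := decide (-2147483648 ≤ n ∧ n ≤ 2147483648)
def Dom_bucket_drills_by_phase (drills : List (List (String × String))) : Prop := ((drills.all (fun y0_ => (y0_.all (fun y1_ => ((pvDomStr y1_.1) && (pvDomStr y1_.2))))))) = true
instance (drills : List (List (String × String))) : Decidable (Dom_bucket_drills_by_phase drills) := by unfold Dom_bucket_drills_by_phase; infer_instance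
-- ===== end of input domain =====

-- B replaces A's single distributing append-loop over a mutable bucket dict by a
-- normalization helper plus per-key filtering over a fixed ordered key list (idiomatic).

-- ===== PORT A =====
def bucket_drills_by_phase (drills : List (List (String × String))) : List (String × List (List (String × String))) :=
  let buckets : PySem.Dict String (List (List (String × String))) :=
    PySem.Dict.ofList [("GPP", []), ("SPP", []), ("TAPER", []), ("UNIVERSAL", [])]
  (drills.foldl (fun buckets d =>
      let phase := PySem.Str.upper ((PySem.Dict.mk d).getD "phase" "GPP")
      let phase := if buckets.contains phase then phase else "GPP"
      buckets.modify phase [] (fun l => l ++ [d]))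
    buckets).items

-- ===== PORT B =====
-- helper mirroring Source B's _norm_phase
def pvNormPhase (d : List (String × String)) : String :=
  let p := PySem.Str.upper ((PySem.Dict.mk d).getD "phase" "GPP")
  if ["GPP", "SPP", "TAPER", "UNIVERSAL"].contains p then p else "GPP"

def bucket_drills_by_phase_alt (drills : List (List (String × String))) : List (String × List (List (String × String))) :=
  ["GPP", "SPP", "TAPER", "UNIVERSAL"].map
    (fun k => (k, drills.filter (fun d => pvNormPhase d == k)))

-- ===== PRECONDITION & SPEC =====
def Spec_bucket_drills_by_phase (drills : List (List (String × String))) (out : List (String × List (List (String × String)))) : Prop := out = bucket_drills_by_phase_alt drills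
instance (drills : List (List (String × String))) (out : List (String × List (List (String × String)))) : Decidable (Spec_bucket_drills_by_phase drills out) := by unfold Spec_bucket_drills_by_phase; infer_instance

-- ===== CLAIM (what is proved, stated in full; the proofs are below) =====
def Claim_equal_bucket_drills_by_phase : Prop := ∀ (drills : List (List (String × String))), Dom_bucket_drills_by_phase drills → Spec_bucket_drills_by_phase drills (bucket_drills_by_phase drills)

-- ===== LEMMAS AND PROOFS =====

-- pvNormPhase always yields one of the four bucket keys
theorem pvNormPhase_cases (d : List (String × String)) :
    pvNormPhase d = "GPP" ∨ pvNormPhase d = "SPP" ∨ pvNormPhase d = "TAPER" ∨ pvNormPhase d = "UNIVERSAL" := by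
  have hdef : pvNormPhase d =
      (if (["GPP", "SPP", "TAPER", "UNIVERSAL"] : List String).contains
          (PySem.Str.upper ((PySem.Dict.mk d).getD "phase" "GPP")) = true
        then PySem.Str.upper ((PySem.Dict.mk d).getD "phase" "GPP") else "GPP") := rfl
  by_cases h : (["GPP", "SPP", "TAPER", "UNIVERSAL"] : List String).contains
      (PySem.Str.upper ((PySem.Dict.mk d).getD "phase" "GPP")) = true
  · rw [hdef, if_pos h]
    simp only [List.contains_eq_mem, List.mem_cons, List.not_mem_nil, or_false, decide_eq_true_eq] at h
    tauto
  · rw [hdef, if_neg h]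
    tauto

-- A's dict.contains on the concrete four-key dict agrees with list membership of the four keys
theorem bucket_contains (p : String) (a b c u : List (List (String × String))) :
    (PySem.Dict.mk [("GPP", a), ("SPP", b), ("TAPER", c), ("UNIVERSAL", u)]).contains p
      = ["GPP", "SPP", "TAPER", "UNIVERSAL"].contains p := by
  rw [Bool.eq_iff_iff]
  simp only [PySem.Dict.contains, List.contains_eq_mem, List.any_cons, List.any_nil,
    List.mem_cons, List.not_mem_nil, or_false, Bool.or_false, Bool.or_eq_true, beq_iff_eq,
    decide_eq_true_eq]
  constructor <;> (rintro (h | h | h | h) <;> first | exact Or.inl h.symm | exact Or.inr (Or.inl h.symm) | exact Or.inr (Or.inr (Or.inl h.symm)) | exact Or.inr (Or.inr (Or.inr h.symm)))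

-- modify on the concrete four-key dict, one lemma per key
theorem bucket_modify_gpp (a b c u : List (List (String × String))) (f : List (List (String × String)) → List (List (String × String))) :
    (PySem.Dict.mk [("GPP", a), ("SPP", b), ("TAPER", c), ("UNIVERSAL", u)]).modify "GPP" [] f
      = PySem.Dict.mk [("GPP", f a), ("SPP", b), ("TAPER", c), ("UNIVERSAL", u)] := by
  simp [PySem.Dict.modify, PySem.Dict.insert, PySem.Dict.get?, PySem.Dict.getD, PySem.Dict.contains]

theorem bucket_modify_spp (a b c u : List (List (String × String))) (f : List (List (String × String)) → List (List (String × String))) :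
    (PySem.Dict.mk [("GPP", a), ("SPP", b), ("TAPER", c), ("UNIVERSAL", u)]).modify "SPP" [] f
      = PySem.Dict.mk [("GPP", a), ("SPP", f b), ("TAPER", c), ("UNIVERSAL", u)] := by
  simp [PySem.Dict.modify, PySem.Dict.insert, PySem.Dict.get?, PySem.Dict.getD, PySem.Dict.contains]

theorem bucket_modify_taper (a b c u : List (List (String × String))) (f : List (List (String × String)) → List (List (String × String))) :
    (PySem.Dict.mk [("GPP", a), ("SPP", b), ("TAPER", c), ("UNIVERSAL", u)]).modify "TAPER" [] f
      = PySem.Dict.mk [("GPP", a), ("SPP", b), ("TAPER", f c), ("UNIVERSAL", u)] := by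
  simp [PySem.Dict.modify, PySem.Dict.insert, PySem.Dict.get?, PySem.Dict.getD, PySem.Dict.contains]

theorem bucket_modify_universal (a b c u : List (List (String × String))) (f : List (List (String × String)) → List (List (String × String))) :
    (PySem.Dict.mk [("GPP", a), ("SPP", b), ("TAPER", c), ("UNIVERSAL", u)]).modify "UNIVERSAL" [] f
      = PySem.Dict.mk [("GPP", a), ("SPP", b), ("TAPER", c), ("UNIVERSAL", f u)] := by
  simp [PySem.Dict.modify, PySem.Dict.insert, PySem.Dict.get?, PySem.Dict.getD, PySem.Dict.contains]

-- one step of A's loop is a modify at the normalized phase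
theorem bucket_step (d : List (String × String)) (a b c u : List (List (String × String))) :
    (let phase := PySem.Str.upper ((PySem.Dict.mk d).getD "phase" "GPP")
     let phase := if (PySem.Dict.mk [("GPP", a), ("SPP", b), ("TAPER", c), ("UNIVERSAL", u)]).contains phase then phase else "GPP"
     (PySem.Dict.mk [("GPP", a), ("SPP", b), ("TAPER", c), ("UNIVERSAL", u)]).modify phase [] (fun l => l ++ [d]))
    = (PySem.Dict.mk [("GPP", a), ("SPP", b), ("TAPER", c), ("UNIVERSAL", u)]).modify (pvNormPhase d) [] (fun l => l ++ [d]) := by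
  simp only [pvNormPhase, bucket_contains]

-- loop invariant: A's fold over an explicit 4-bucket dict equals per-key filtering
theorem bucket_loop_inv (ds : List (List (String × String)))
    (a b c u : List (List (String × String))) :
    (ds.foldl (fun buckets d =>
        let phase := PySem.Str.upper ((PySem.Dict.mk d).getD "phase" "GPP")
        let phase := if buckets.contains phase then phase else "GPP"
        buckets.modify phase [] (fun l => l ++ [d]))
      (PySem.Dict.mk [("GPP", a), ("SPP", b), ("TAPER", c), ("UNIVERSAL", u)])).items
    = [("GPP", a ++ ds.filter (fun d => pvNormPhase d == "GPP")),
       ("SPP", b ++ ds.filter (fun d => pvNormPhase d == "SPP")),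
       ("TAPER", c ++ ds.filter (fun d => pvNormPhase d == "TAPER")),
       ("UNIVERSAL", u ++ ds.filter (fun d => pvNormPhase d == "UNIVERSAL"))] := by
  induction ds generalizing a b c u with
  | nil => simp
  | cons d ds ih =>
    rw [List.foldl_cons, bucket_step]
    rcases pvNormPhase_cases d with h | h | h | h
    · rw [h, bucket_modify_gpp, ih]
      simp [h]
    · rw [h, bucket_modify_spp, ih]
      simp [h]
    · rw [h, bucket_modify_taper, ih]
      simp [h]
    · rw [h, bucket_modify_universal, ih]
      simp [h]

-- ===== VERDICT (by name: the statement is the Claim_ definition above) =====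
theorem bucket_drills_by_phase_spec : Claim_equal_bucket_drills_by_phase := by
  intro drills _
  show bucket_drills_by_phase drills = bucket_drills_by_phase_alt drills
  unfold bucket_drills_by_phase bucket_drills_by_phase_alt
  simpa [PySem.Dict.ofList] using bucket_loop_inv drills [] [] [] []
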